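-- pv_equiv track=rewrite | github.com/banarin/exercice_python | exercice14.py | dico_pro
-- ===== SOURCE A (Python) =====
-- def dico_pro(dico):
--     dic_toto = {}
--     total_price = 1
--     for key, sous_dic in dico.items():
--         for sous_key,value in sous_dic.items():
--             total_price *= value
--         dic_toto[key] = total_price
--     return dic_toto
-- ===== SOURCE B (Python) =====
-- def _prod(vals):
--     t = 1
--     for v in vals:
--         t *= v
--     return t
--
--
-- def dico_pro(dico):
--     # pass 1: per-key inner products; pass 2: running products; then zip with the keys
--     products = [_prod(sous_dic.values()) for sous_dic in dico.values()]
--     running = []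
--     acc = 1
--     for p in products:
--         acc *= p
--         running.append(acc)
--     return dict(zip(dico, running))
-- ===== Notes on version B (the rewrite author's own statement) =====
-- stated objective: simpler
-- what changed: Replaces A's intertwined double loop with threaded never-reset total_price by three flat passes: a list of per-key inner products, a running-product accumulation over that list, and a zip of the keys with the running products.
import Mathlib
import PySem

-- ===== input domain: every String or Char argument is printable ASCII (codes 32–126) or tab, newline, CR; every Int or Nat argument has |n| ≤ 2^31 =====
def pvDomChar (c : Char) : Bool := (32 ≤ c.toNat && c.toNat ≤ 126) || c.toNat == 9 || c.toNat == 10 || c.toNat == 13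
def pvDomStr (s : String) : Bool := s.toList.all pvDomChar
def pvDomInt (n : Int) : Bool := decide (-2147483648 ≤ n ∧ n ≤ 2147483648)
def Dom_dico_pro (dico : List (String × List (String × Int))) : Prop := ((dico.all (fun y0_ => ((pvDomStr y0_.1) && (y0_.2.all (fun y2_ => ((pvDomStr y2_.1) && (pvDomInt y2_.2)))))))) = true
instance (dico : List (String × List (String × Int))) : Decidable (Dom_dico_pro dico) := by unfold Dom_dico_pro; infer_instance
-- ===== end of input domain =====

-- B replaces A's intertwined double loop by three flat passes (per-key inner products,
-- running products, zip with the keys); objective: simpler decomposition, same cost.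


-- ===== PORT A =====
-- single fold over the outer dict, threading (result-so-far, total_price);
-- inner loop 'for sous_key, value in sous_dic.items(): total_price *= value' is the inner foldl
def dico_pro (dico : List (String × List (String × Int))) : List (String × Int) :=
  (dico.foldl
    (fun (st : List (String × Int) × Int) kv =>
      let total := kv.2.foldl (fun t p => t * p.2) st.2
      (st.1 ++ [(kv.1, total)], total))
    ([], 1)).1

-- ===== PORT B =====
-- _prod(vals): t = 1; for v in vals: t *= v
def dico_pro_prod (vals : List Int) : Int :=
  vals.foldl (fun t v => t * v) 1

def dico_pro_alt (dico : List (String × List (String × Int))) : List (String × Int) :=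
  let products := dico.map (fun kv => dico_pro_prod (kv.2.map (·.2)))
  let running := (products.foldl (fun (st : List Int × Int) p => (st.1 ++ [st.2 * p], st.2 * p)) ([], 1)).1
  (dico.map (·.1)).zip running

-- ===== PRECONDITION & SPEC =====
def Spec_dico_pro (dico : List (String × List (String × Int))) (out : List (String × Int)) : Prop := out = dico_pro_alt dico
instance (dico : List (String × List (String × Int))) (out : List (String × Int)) : Decidable (Spec_dico_pro dico out) := by unfold Spec_dico_pro; infer_instance

-- ===== CLAIM (what is proved, stated in full; the proofs are below) =====
def Claim_equal_dico_pro : Prop := ∀ (dico : List (String × List (String × Int))), Dom_dico_pro dico → Spec_dico_pro dico (dico_pro dico)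

-- ===== LEMMAS AND PROOFS =====

-- the running-product sequence both folds produce, as a structural recursion
def pvAccRun (t : Int) : List Int → List Int
  | [] => []
  | p :: ps => (t * p) :: pvAccRun (t * p) ps

theorem pv_mul_shift (xs : List Int) (t : Int) :
    xs.foldl (fun a v => a * v) t = t * xs.foldl (fun a v => a * v) 1 := by
  induction xs generalizing t with
  | nil => simp
  | cons x xs ih =>
    simp only [List.foldl_cons]
    rw [ih (t * x), ih (1 * x)]
    ring

theorem pv_foldl_mul (xs : List (String × Int)) (t : Int) :
    xs.foldl (fun a p => a * p.2) t = t * dico_pro_prod (xs.map (·.2)) := by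
  induction xs generalizing t with
  | nil => simp [dico_pro_prod]
  | cons x xs ih =>
    simp only [List.foldl_cons, List.map_cons, dico_pro_prod]
    rw [ih (t * x.2), pv_mul_shift _ (1 * x.2)]
    simp only [dico_pro_prod]
    ring

theorem pv_A_fold (l : List (String × List (String × Int)))
    (acc : List (String × Int)) (t : Int) :
    (l.foldl
      (fun (st : List (String × Int) × Int) kv =>
        let total := kv.2.foldl (fun t p => t * p.2) st.2
        (st.1 ++ [(kv.1, total)], total))
      (acc, t)).1
    = acc ++ (l.map (·.1)).zip (pvAccRun t (l.map (fun kv => dico_pro_prod (kv.2.map (·.2))))) := by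
  induction l generalizing acc t with
  | nil => simp
  | cons kv l ih =>
    simp only [List.foldl_cons, List.map_cons, pvAccRun, List.zip_cons_cons]
    rw [pv_foldl_mul, ih]
    simp

theorem pv_B_fold (ps : List Int) (acc : List Int) (t : Int) :
    (ps.foldl (fun (st : List Int × Int) p => (st.1 ++ [st.2 * p], st.2 * p)) (acc, t)).1
    = acc ++ pvAccRun t ps := by
  induction ps generalizing acc t with
  | nil => simp [pvAccRun]
  | cons p ps ih =>
    simp only [List.foldl_cons, pvAccRun]
    rw [ih]
    simp

-- ===== VERDICT (by name: the statement is the Claim_ definition above) =====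
theorem dico_pro_spec : Claim_equal_dico_pro := by
  intro dico _
  unfold Spec_dico_pro dico_pro dico_pro_alt
  dsimp only
  rw [pv_A_fold, pv_B_fold]
  simp
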